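-- pv_equiv track=rewrite | github.com/wyattowalsh/agents | skills/namer/scripts/generate.py | _classify_consonants
-- ===== SOURCE A (Python) =====
-- PLOSIVES = set("bpktdg")
--
-- FRICATIVES = set("fsvz")  # sh/zh handled separately
--
-- SONORANTS = set("lmnr")
--
-- def _classify_consonants(name: str) -> dict[str, list[str]]:
--     """Classify consonants in the name by phonetic category."""
--     name_lower = name.lower()
--     result: dict[str, list[str]] = {
--         "plosives": [],
--         "fricatives": [],
--         "sonorants": [],
--         "affricates": [],
--     }
--     i = 0
--     while i < len(name_lower):
--         # Check digraphs first
--         if i + 1 < len(name_lower):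
--             digraph = name_lower[i : i + 2]
--             if digraph in ("ch", "tch"):
--                 result["affricates"].append(digraph)
--                 i += 2
--                 continue
--             if digraph in ("sh", "zh", "th"):
--                 result["fricatives"].append(digraph)
--                 i += 2
--                 continue
--         ch = name_lower[i]
--         if ch in PLOSIVES:
--             result["plosives"].append(ch)
--         elif ch in FRICATIVES:
--             result["fricatives"].append(ch)
--         elif ch in SONORANTS:
--             result["sonorants"].append(ch)
--         elif ch == "j":
--             result["affricates"].append(ch)
--         i += 1
--     return result
-- ===== SOURCE B (Python) =====
-- # Single token->category table; a one-character-lookbehind state machine replaces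
-- # the index/slice loop (constant-factor faster: no per-step slicing, one lookup).
-- _CAT = {
--     "ch": "affricates", "sh": "fricatives", "zh": "fricatives", "th": "fricatives",
--     "j": "affricates",
--     "b": "plosives", "p": "plosives", "k": "plosives", "t": "plosives",
--     "d": "plosives", "g": "plosives",
--     "f": "fricatives", "s": "fricatives", "v": "fricatives", "z": "fricatives",
--     "l": "sonorants", "m": "sonorants", "n": "sonorants", "r": "sonorants",
-- }
--
-- def _classify_consonants(name: str) -> dict[str, list[str]]:
--     """Classify consonants in the name by phonetic category."""
--     result: dict[str, list[str]] = {
--         "plosives": [],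
--         "fricatives": [],
--         "sonorants": [],
--         "affricates": [],
--     }
--
--     def emit(tok: str) -> None:
--         cat = _CAT.get(tok)
--         if cat is not None:
--             result[cat].append(tok)
--
--     # One-character-lookbehind state machine: `pending` holds a possible
--     # digraph starter; a following 'h' completes the digraph, anything else
--     # flushes the pending letter on its own.
--     pending = None
--     for c in name.lower():
--         if pending is not None and pending + c in ("ch", "sh", "zh", "th"):
--             emit(pending + c)
--             pending = None
--             continue
--         if pending is not None:
--             emit(pending)
--         pending = c if c in "cszt" else None
--         if pending is None:
--             emit(c)
--     if pending is not None:
--         emit(pending)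
--     return result
-- ===== Notes on version B (the rewrite author's own statement) =====
-- stated objective: faster
-- what changed: Replaced the index-based while loop with per-step string slicing and four chained set-membership branches by a one-character-lookbehind state machine over the characters with a single token-to-category dict lookup (the dead three-character digraph branch disappears).
import Mathlib
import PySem

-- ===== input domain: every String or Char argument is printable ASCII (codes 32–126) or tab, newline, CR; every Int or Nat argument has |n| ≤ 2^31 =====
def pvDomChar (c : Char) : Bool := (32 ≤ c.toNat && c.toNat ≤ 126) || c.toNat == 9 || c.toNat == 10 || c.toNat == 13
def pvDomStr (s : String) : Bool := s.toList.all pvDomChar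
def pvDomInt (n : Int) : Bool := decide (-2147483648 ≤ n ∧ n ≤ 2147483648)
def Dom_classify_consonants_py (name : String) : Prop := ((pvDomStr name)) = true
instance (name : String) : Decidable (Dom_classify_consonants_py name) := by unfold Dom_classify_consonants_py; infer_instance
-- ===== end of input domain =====

-- B replaces A's index/slice while-loop and chained membership branches by a one-character-
-- lookbehind state machine with a single token→category dictionary (measured constant-factor faster).

-- ===== PORT A =====
def pyPLOSIVES : PySem.Set Char := PySem.Set.ofList "bpktdg".toList
def pyFRICATIVES : PySem.Set Char := PySem.Set.ofList "fsvz".toList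
def pySONORANTS : PySem.Set Char := PySem.Set.ofList "lmnr".toList

def initResultA : PySem.Dict String (List String) :=
  PySem.Dict.ofList [("plosives", []), ("fricatives", []), ("sonorants", []), ("affricates", [])]

def stepSingleA (c : Char) (d : PySem.Dict String (List String)) : PySem.Dict String (List String) :=
  if pyPLOSIVES.contains c then d.modify "plosives" [] (· ++ [String.ofList [c]])
  else if pyFRICATIVES.contains c then d.modify "fricatives" [] (· ++ [String.ofList [c]])
  else if pySONORANTS.contains c then d.modify "sonorants" [] (· ++ [String.ofList [c]])
  else if c == 'j' then d.modify "affricates" [] (· ++ [String.ofList [c]])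
  else d

def loopA : List Char → PySem.Dict String (List String) → PySem.Dict String (List String)
  | c1 :: c2 :: rest, d =>
    let dg := String.ofList [c1, c2]
    if dg == "ch" || dg == "tch" then
      loopA rest (d.modify "affricates" [] (· ++ [dg]))
    else if dg == "sh" || dg == "zh" || dg == "th" then
      loopA rest (d.modify "fricatives" [] (· ++ [dg]))
    else
      loopA (c2 :: rest) (stepSingleA c1 d)
  | [c], d => stepSingleA c d
  | [], d => d

def classify_consonants_py (name : String) : List (String × List String) :=
  (loopA (PySem.Str.lower name).toList initResultA).items

-- ===== PORT B =====
def catB : PySem.Dict String String := PySem.Dict.ofList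
  [("ch", "affricates"), ("sh", "fricatives"), ("zh", "fricatives"), ("th", "fricatives"),
   ("j", "affricates"),
   ("b", "plosives"), ("p", "plosives"), ("k", "plosives"), ("t", "plosives"),
   ("d", "plosives"), ("g", "plosives"),
   ("f", "fricatives"), ("s", "fricatives"), ("v", "fricatives"), ("z", "fricatives"),
   ("l", "sonorants"), ("m", "sonorants"), ("n", "sonorants"), ("r", "sonorants")]

def initResultB : PySem.Dict String (List String) :=
  PySem.Dict.ofList [("plosives", []), ("fricatives", []), ("sonorants", []), ("affricates", [])]

def emitB (tok : String) (d : PySem.Dict String (List String)) : PySem.Dict String (List String) :=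
  match catB.get? tok with
  | some cat => d.modify cat [] (· ++ [tok])
  | none => d

def stepB (st : Option Char × PySem.Dict String (List String)) (c : Char) :
    Option Char × PySem.Dict String (List String) :=
  match st with
  | (some p, d) =>
    let dg := String.ofList [p, c]
    if dg == "ch" || dg == "sh" || dg == "zh" || dg == "th" then
      (none, emitB dg d)
    else
      let d1 := emitB (String.ofList [p]) d
      if "cszt".toList.contains c then (some c, d1) else (none, emitB (String.ofList [c]) d1)
  | (none, d) =>
    if "cszt".toList.contains c then (some c, d) else (none, emitB (String.ofList [c]) d)

def finishB : Option Char × PySem.Dict String (List String) → PySem.Dict String (List String)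
  | (some p, d) => emitB (String.ofList [p]) d
  | (none, d) => d

def classify_consonants_py_alt (name : String) : List (String × List String) :=
  (finishB ((PySem.Str.lower name).toList.foldl stepB (none, initResultB))).items

-- ===== PRECONDITION & SPEC =====
def Spec_classify_consonants_py (name : String) (out : List (String × List String)) : Prop := out = classify_consonants_py_alt name
instance (name : String) (out : List (String × List String)) : Decidable (Spec_classify_consonants_py name out) := by unfold Spec_classify_consonants_py; infer_instance

-- ===== CLAIM (what is proved, stated in full; the proofs are below) =====
def Claim_equal_classify_consonants_py : Prop := ∀ (name : String), Dom_classify_consonants_py name → Spec_classify_consonants_py name (classify_consonants_py name)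

-- ===== LEMMAS AND PROOFS =====

-- String equality mirrors char-list equality.
lemma beq_toList (s t : String) : (s == t) = (s.toList == t.toList) := by
  rw [Bool.eq_iff_iff]
  simp [← String.toList_inj]

-- A's single-character classification agrees with B's dictionary lookup.
lemma stepSingleA_eq_emitB (c : Char) (d : PySem.Dict String (List String)) :
    stepSingleA c d = emitB (String.ofList [c]) d := by
  by_cases h1 : c = 'b'; · subst h1; rfl
  by_cases h2 : c = 'p'; · subst h2; rfl
  by_cases h3 : c = 'k'; · subst h3; rfl
  by_cases h4 : c = 't'; · subst h4; rfl
  by_cases h5 : c = 'd'; · subst h5; rfl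
  by_cases h6 : c = 'g'; · subst h6; rfl
  by_cases h7 : c = 'f'; · subst h7; rfl
  by_cases h8 : c = 's'; · subst h8; rfl
  by_cases h9 : c = 'v'; · subst h9; rfl
  by_cases h10 : c = 'z'; · subst h10; rfl
  by_cases h11 : c = 'l'; · subst h11; rfl
  by_cases h12 : c = 'm'; · subst h12; rfl
  by_cases h13 : c = 'n'; · subst h13; rfl
  by_cases h14 : c = 'r'; · subst h14; rfl
  by_cases h15 : c = 'j'; · subst h15; rfl
  have hget : catB.get? (String.ofList [c]) = none := by
    have hc : catB = PySem.Dict.mk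
      [("ch", "affricates"), ("sh", "fricatives"), ("zh", "fricatives"), ("th", "fricatives"),
       ("j", "affricates"),
       ("b", "plosives"), ("p", "plosives"), ("k", "plosives"), ("t", "plosives"),
       ("d", "plosives"), ("g", "plosives"),
       ("f", "fricatives"), ("s", "fricatives"), ("v", "fricatives"), ("z", "fricatives"),
       ("l", "sonorants"), ("m", "sonorants"), ("n", "sonorants"), ("r", "sonorants")] := by decide
    rw [hc]
    simp [PySem.Dict.get?, beq_toList, Ne.symm h1, Ne.symm h2, Ne.symm h3, Ne.symm h4, Ne.symm h5, Ne.symm h6, Ne.symm h7, Ne.symm h8, Ne.symm h9, Ne.symm h10, Ne.symm h11, Ne.symm h12, Ne.symm h13, Ne.symm h14, Ne.symm h15]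
  simp [stepSingleA, emitB, hget, pyPLOSIVES, pyFRICATIVES, pySONORANTS,
        PySem.Set.ofList, h1, h2, h3, h4, h5, h6, h7, h8, h9, h10, h11, h12, h13, h14, h15]

-- A flushed pending starter behaves like emitting it first.
lemma stepB_flush (p c : Char) (d : PySem.Dict String (List String))
    (h : (String.ofList [p, c] == "ch" || String.ofList [p, c] == "sh" ||
          String.ofList [p, c] == "zh" || String.ofList [p, c] == "th") = false) :
    stepB (some p, d) c = stepB (none, emitB (String.ofList [p]) d) c := by
  simp only [stepB, h]
  rfl

lemma main_loop (cs : List Char) (d : PySem.Dict String (List String)) :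
    loopA cs d = finishB (cs.foldl stepB (none, d)) := by
  induction cs, d using loopA.induct with
  | case1 c1 c2 rest d dg h ih =>
    have h' : c1 = 'c' ∧ c2 = 'h' := by
      simp only [dg, beq_toList] at h
      simpa using h
    obtain ⟨rfl, rfl⟩ := h'
    rw [loopA]
    rw [if_pos (by decide)]
    simp only [List.foldl_cons]
    rw [show stepB (stepB (none, d) 'c') 'h'
          = (none, d.modify "affricates" [] (fun x => x ++ [String.ofList ['c', 'h']])) from rfl]
    exact ih
  | case2 c1 c2 rest d dg h1 h ih =>
    have h' : (c1 = 's' ∧ c2 = 'h') ∨ (c1 = 'z' ∧ c2 = 'h') ∨ (c1 = 't' ∧ c2 = 'h') := by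
      simp only [dg, beq_toList] at h
      simpa [or_assoc] using h
    rcases h' with ⟨rfl, rfl⟩ | ⟨rfl, rfl⟩ | ⟨rfl, rfl⟩
    · rw [loopA, if_neg (by decide), if_pos (by decide)]
      simp only [List.foldl_cons]
      rw [show stepB (stepB (none, d) 's') 'h'
            = (none, d.modify "fricatives" [] (fun x => x ++ [String.ofList ['s', 'h']])) from rfl]
      exact ih
    · rw [loopA, if_neg (by decide), if_pos (by decide)]
      simp only [List.foldl_cons]
      rw [show stepB (stepB (none, d) 'z') 'h'
            = (none, d.modify "fricatives" [] (fun x => x ++ [String.ofList ['z', 'h']])) from rfl]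
      exact ih
    · rw [loopA, if_neg (by decide), if_pos (by decide)]
      simp only [List.foldl_cons]
      rw [show stepB (stepB (none, d) 't') 'h'
            = (none, d.modify "fricatives" [] (fun x => x ++ [String.ofList ['t', 'h']])) from rfl]
      exact ih
  | case3 c1 c2 rest d dg h1 h2 ih =>
    rw [loopA, if_neg h1, if_neg h2]
    simp only [List.foldl_cons] at ih ⊢
    have key : stepB (stepB (none, d) c1) c2 = stepB (none, stepSingleA c1 d) c2 := by
      by_cases hc : ("cszt".toList.contains c1) = true
      · rw [show stepB (none, d) c1 = (some c1, d) from by simp only [stepB]; rw [if_pos hc]]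
        have hB : (String.ofList [c1, c2] == "ch" || String.ofList [c1, c2] == "sh" ||
                   String.ofList [c1, c2] == "zh" || String.ofList [c1, c2] == "th") = false := by
          simp only [dg, Bool.or_eq_true, not_or, Bool.not_eq_true] at h1 h2
          simp [h1.1, h2.1.1, h2.1.2, h2.2]
        rw [stepB_flush c1 c2 d hB, stepSingleA_eq_emitB]
      · rw [show stepB (none, d) c1 = (none, emitB (String.ofList [c1]) d) from by
              simp only [stepB]; rw [if_neg hc],
            stepSingleA_eq_emitB]
    rw [key]
    exact ih
  | case4 c d =>
    simp only [loopA, List.foldl_cons, List.foldl_nil]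
    rw [stepSingleA_eq_emitB]
    by_cases hc : ("cszt".toList.contains c) = true
    · rw [show stepB (none, d) c = (some c, d) from by simp only [stepB]; rw [if_pos hc]]
      rfl
    · rw [show stepB (none, d) c = (none, emitB (String.ofList [c]) d) from by
            simp only [stepB]; rw [if_neg hc]]
      rfl
  | case5 d => rfl

-- ===== VERDICT (by name: the statement is the Claim_ definition above) =====
theorem classify_consonants_py_spec : Claim_equal_classify_consonants_py := by
  intro name _
  unfold Spec_classify_consonants_py classify_consonants_py classify_consonants_py_alt
  rw [main_loop]
  rfl
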